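-- pv_equiv track=rewrite | github.com/SilentCatVallis/HomeworkOP | photo_app/fingers.py | del_noise_point
-- ===== SOURCE A (Python) =====
-- def remove_double(x, y):
--     z = []
--     for i in x:
--         c = True
--         for j in y:
--             if i == j:
--                 c = False
--         if c:
--             z.append(i)
--     for i in y:
--         c = True
--         for j in x:
--             if i == j:
--                 c = False
--         if c:
--             z.append(i)
--     return z
--
-- def del_noise_point(r):
--     tmp = []
--     tmp2 = []
--     for i in r[1]:
--         x = range(i[0] - 5, i[0] + 5)
--         y = range(i[1] - 5, i[1] + 5)
--         for j in r[0]: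
--             if j[0] in x and j[1] in y:
--                 tmp.append(i)
--                 tmp2.append(j)
--     return remove_double(r[0], tmp2), remove_double(r[1], tmp)
-- ===== SOURCE B (Python) =====
-- def del_noise_point(r):
--     pts0, pts1 = r
--
--     def make_grid(pts):
--         g = {}
--         for p in pts:
--             g.setdefault((p[0] // 10, p[1] // 10), []).append(p)
--         return g
--
--     def near(j, i):
--         return i[0] - 5 <= j[0] <= i[0] + 4 and i[1] - 5 <= j[1] <= i[1] + 4
--
--     g0, g1 = make_grid(pts0), make_grid(pts1)
--
--     def matched0(j):
--         return any(near(j, i)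
--                    for cx in ((j[0] - 4) // 10, (j[0] + 5) // 10)
--                    for cy in ((j[1] - 4) // 10, (j[1] + 5) // 10)
--                    for i in g1.get((cx, cy), ()))
--
--     def matched1(i):
--         return any(near(j, i)
--                    for cx in ((i[0] - 5) // 10, (i[0] + 4) // 10)
--                    for cy in ((i[1] - 5) // 10, (i[1] + 4) // 10)
--                    for j in g0.get((cx, cy), ()))
--
--     return ([j for j in pts0 if not matched0(j)],
--             [i for i in pts1 if not matched1(i)])
-- ===== Notes on version B (the rewrite author's own statement) =====
-- stated objective: faster
-- what changed: B buckets each list into a spatial grid of 10x10 cells once and decides each point by probing at most 4 neighbouring buckets, instead of A's all-pairs window scan followed by a quadratic remove_double symmetric difference over the duplicate-laden match lists.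
import Mathlib
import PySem

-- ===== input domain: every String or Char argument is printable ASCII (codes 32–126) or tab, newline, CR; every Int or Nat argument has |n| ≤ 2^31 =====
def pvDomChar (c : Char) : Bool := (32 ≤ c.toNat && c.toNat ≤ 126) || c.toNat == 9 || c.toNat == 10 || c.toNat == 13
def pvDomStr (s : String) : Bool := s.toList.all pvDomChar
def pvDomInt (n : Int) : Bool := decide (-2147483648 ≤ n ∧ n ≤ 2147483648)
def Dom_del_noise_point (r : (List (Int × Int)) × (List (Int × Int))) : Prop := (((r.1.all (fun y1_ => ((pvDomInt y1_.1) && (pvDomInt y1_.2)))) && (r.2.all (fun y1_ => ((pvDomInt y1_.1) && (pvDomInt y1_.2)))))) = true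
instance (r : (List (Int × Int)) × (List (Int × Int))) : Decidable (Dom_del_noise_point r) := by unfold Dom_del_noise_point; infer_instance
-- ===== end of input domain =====

-- B replaces A's all-pairs window scan + quadratic remove_double by a 10x10 spatial grid with
-- at most 4 bucket probes per point; measured faster (asymptotic).

-- ===== PORT A =====
-- exact: Python `v in range(a, b)` (step 1) ⟺ a ≤ v < b; tuple equality `i == j` is structural.
def pvRemoveDouble (x y : List (Int × Int)) : List (Int × Int) :=
  let z := x.foldl (fun z i =>
    let c := y.foldl (fun c j => if i = j then false else c) true
    if c then z ++ [i] else z) []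
  y.foldl (fun z i =>
    let c := x.foldl (fun c j => if i = j then false else c) true
    if c then z ++ [i] else z) z

def del_noise_point (r : (List (Int × Int)) × (List (Int × Int))) : (List (Int × Int)) × (List (Int × Int)) :=
  let tt := r.2.foldl (fun (tt : List (Int × Int) × List (Int × Int)) i =>
    r.1.foldl (fun tt j =>
      if (i.1 - 5 ≤ j.1 ∧ j.1 < i.1 + 5) ∧ (i.2 - 5 ≤ j.2 ∧ j.2 < i.2 + 5)
      then (tt.1 ++ [i], tt.2 ++ [j]) else tt) tt) ([], [])
  (pvRemoveDouble r.1 tt.2, pvRemoveDouble r.2 tt.1)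

-- ===== PORT B =====
-- helper `near(j, i)` of Source B
def pvNearB (j i : Int × Int) : Bool :=
  decide ((i.1 - 5 ≤ j.1 ∧ j.1 ≤ i.1 + 4) ∧ (i.2 - 5 ≤ j.2 ∧ j.2 ≤ i.2 + 4))

-- helper `make_grid` of Source B: g.setdefault(cell, []).append(p)  ⟺  g[cell] = g.get(cell, []) + [p]
def pvGrid (pts : List (Int × Int)) : PySem.Dict (Int × Int) (List (Int × Int)) :=
  pts.foldl (fun g p =>
    PySem.Dict.modify g (PySem.Int.floordiv p.1 10, PySem.Int.floordiv p.2 10) [] (fun l => l ++ [p]))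
    PySem.Dict.empty

-- helper `matched0` of Source B (the two candidate cells per axis, possibly equal)
def pvMatched0 (g1 : PySem.Dict (Int × Int) (List (Int × Int))) (j : Int × Int) : Bool :=
  [PySem.Int.floordiv (j.1 - 4) 10, PySem.Int.floordiv (j.1 + 5) 10].any fun cx =>
  [PySem.Int.floordiv (j.2 - 4) 10, PySem.Int.floordiv (j.2 + 5) 10].any fun cy =>
  (PySem.Dict.getD g1 (cx, cy) []).any fun i => pvNearB j i

-- helper `matched1` of Source B
def pvMatched1 (g0 : PySem.Dict (Int × Int) (List (Int × Int))) (i : Int × Int) : Bool :=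
  [PySem.Int.floordiv (i.1 - 5) 10, PySem.Int.floordiv (i.1 + 4) 10].any fun cx =>
  [PySem.Int.floordiv (i.2 - 5) 10, PySem.Int.floordiv (i.2 + 4) 10].any fun cy =>
  (PySem.Dict.getD g0 (cx, cy) []).any fun j => pvNearB j i

def del_noise_point_alt (r : (List (Int × Int)) × (List (Int × Int))) : (List (Int × Int)) × (List (Int × Int)) :=
  let g0 := pvGrid r.1
  let g1 := pvGrid r.2
  (r.1.filter (fun j => !(pvMatched0 g1 j)),
   r.2.filter (fun i => !(pvMatched1 g0 i)))

-- ===== PRECONDITION & SPEC =====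
def Spec_del_noise_point (r : (List (Int × Int)) × (List (Int × Int))) (out : (List (Int × Int)) × (List (Int × Int))) : Prop := out = del_noise_point_alt r
instance (r : (List (Int × Int)) × (List (Int × Int))) (out : (List (Int × Int)) × (List (Int × Int))) : Decidable (Spec_del_noise_point r out) := by unfold Spec_del_noise_point; infer_instance

-- ===== CLAIM (what is proved, stated in full; the proofs are below) =====
def Claim_equal_del_noise_point : Prop := ∀ (r : (List (Int × Int)) × (List (Int × Int))), Dom_del_noise_point r → Spec_del_noise_point r (del_noise_point r)

-- ===== LEMMAS AND PROOFS =====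

-- the window predicate of A (strict upper bound form); equal to pvNearB pointwise
def pvNear (j i : Int × Int) : Bool :=
  decide ((i.1 - 5 ≤ j.1 ∧ j.1 < i.1 + 5) ∧ (i.2 - 5 ≤ j.2 ∧ j.2 < i.2 + 5))

theorem pv_nearB_eq_near (j i : Int × Int) : pvNearB j i = pvNear j i := by
  unfold pvNearB pvNear
  by_cases h : (i.1 - 5 ≤ j.1 ∧ j.1 < i.1 + 5) ∧ (i.2 - 5 ≤ j.2 ∧ j.2 < i.2 + 5)
  · rw [decide_eq_true h, decide_eq_true (by omega)]
  · rw [decide_eq_false h, decide_eq_false (by omega)]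

-- the inner `c` loop of remove_double computes "i not in l"
theorem pv_cloop (i : Int × Int) (l : List (Int × Int)) (c : Bool) :
    l.foldl (fun c j => if i = j then false else c) c = (c && !(decide (i ∈ l))) := by
  induction l generalizing c with
  | nil => simp
  | cons a t ih =>
      simp only [List.foldl_cons, ih, List.mem_cons]
      by_cases h : i = a <;> simp [h]

-- an append-if foldl is a filter
theorem pv_foldl_filter (p : (Int × Int) → Bool) (l z : List (Int × Int)) :
    l.foldl (fun z i => if p i then z ++ [i] else z) z = z ++ l.filter p := by
  induction l generalizing z with
  | nil => simp
  | cons a t ih => by_cases h : p a <;> simp [List.foldl_cons, h, ih]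

theorem pv_remove_double (x y : List (Int × Int)) :
    pvRemoveDouble x y =
      x.filter (fun i => !(decide (i ∈ y))) ++ y.filter (fun i => !(decide (i ∈ x))) := by
  unfold pvRemoveDouble
  have hx : (fun z i => if (y.foldl (fun c j => if i = j then false else c) true) then z ++ [i] else z)
      = (fun (z : List (Int × Int)) i => if (!(decide (i ∈ y))) then z ++ [i] else z) := by
    funext z i; rw [pv_cloop]; simp
  have hy : (fun z i => if (x.foldl (fun c j => if i = j then false else c) true) then z ++ [i] else z)
      = (fun (z : List (Int × Int)) i => if (!(decide (i ∈ x))) then z ++ [i] else z) := by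
    funext z i; rw [pv_cloop]; simp
  rw [hx, hy, pv_foldl_filter, pv_foldl_filter]
  simp

-- the inner match loop of A, for one i, appends (copies of i, matching j's)
theorem pv_inner (i : Int × Int) (xs : List (Int × Int)) (tt : List (Int × Int) × List (Int × Int)) :
    xs.foldl (fun tt j =>
      if (i.1 - 5 ≤ j.1 ∧ j.1 < i.1 + 5) ∧ (i.2 - 5 ≤ j.2 ∧ j.2 < i.2 + 5)
      then (tt.1 ++ [i], tt.2 ++ [j]) else tt) tt
    = (tt.1 ++ (xs.filter (fun j => pvNear j i)).map (fun _ => i),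
       tt.2 ++ xs.filter (fun j => pvNear j i)) := by
  induction xs generalizing tt with
  | nil => simp
  | cons a t ih =>
      rw [List.foldl_cons]
      by_cases h : (i.1 - 5 ≤ a.1 ∧ a.1 < i.1 + 5) ∧ (i.2 - 5 ≤ a.2 ∧ a.2 < i.2 + 5)
      · rw [if_pos h, ih, List.filter_cons_of_pos (by simpa [pvNear] using h)]
        simp only [List.map_cons, List.append_assoc, List.singleton_append]
      · rw [if_neg h, ih, List.filter_cons_of_neg (by simpa [pvNear] using h)]

-- the whole double loop of A: tmp and tmp2 as flatMaps
theorem pv_outer (xs ys : List (Int × Int)) (tt : List (Int × Int) × List (Int × Int)) :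
    ys.foldl (fun tt i =>
      xs.foldl (fun tt j =>
        if (i.1 - 5 ≤ j.1 ∧ j.1 < i.1 + 5) ∧ (i.2 - 5 ≤ j.2 ∧ j.2 < i.2 + 5)
        then (tt.1 ++ [i], tt.2 ++ [j]) else tt) tt) tt
    = (tt.1 ++ ys.flatMap (fun i => (xs.filter (fun j => pvNear j i)).map (fun _ => i)),
       tt.2 ++ ys.flatMap (fun i => xs.filter (fun j => pvNear j i))) := by
  induction ys generalizing tt with
  | nil => simp
  | cons a t ih =>
      rw [List.foldl_cons, pv_inner, ih]
      simp only [List.flatMap_cons, List.append_assoc]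

theorem pv_mem_tmp2 (xs ys : List (Int × Int)) (j : Int × Int) :
    j ∈ ys.flatMap (fun i => xs.filter (fun j => pvNear j i)) ↔
      j ∈ xs ∧ ys.any (fun i => pvNear j i) := by
  simp only [List.mem_flatMap, List.mem_filter, List.any_eq_true]
  tauto

theorem pv_mem_tmp (xs ys : List (Int × Int)) (i : Int × Int) :
    i ∈ ys.flatMap (fun i => (xs.filter (fun j => pvNear j i)).map (fun _ => i)) ↔
      i ∈ ys ∧ xs.any (fun j => pvNear j i) := by
  simp only [List.mem_flatMap, List.mem_map, List.mem_filter, List.any_eq_true]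
  constructor
  · rintro ⟨i', hi', j, ⟨hj, hn⟩, rfl⟩; exact ⟨hi', j, hj, hn⟩
  · rintro ⟨hi, j, hj, hn⟩; exact ⟨i, hi, j, ⟨hj, hn⟩, rfl⟩

-- ===== B-side lemmas: the grid probes see exactly the near points =====

-- a bucket of the grid holds exactly the points of that cell, in order
theorem pv_grid_getD (pts : List (Int × Int)) (c : Int × Int) :
    PySem.Dict.getD (pvGrid pts) c []
      = pts.filter (fun p => (PySem.Int.floordiv p.1 10, PySem.Int.floordiv p.2 10) == c) := by
  unfold pvGrid
  have : pts.foldl (fun g p =>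
      PySem.Dict.modify g (PySem.Int.floordiv p.1 10, PySem.Int.floordiv p.2 10) [] (fun l => l ++ [p]))
      PySem.Dict.empty
    = (pts.map (fun p => ((PySem.Int.floordiv p.1 10, PySem.Int.floordiv p.2 10), p))).foldl
        (fun d q => PySem.Dict.modify d q.1 [] (fun l => l ++ [q.2])) PySem.Dict.empty := by
    rw [List.foldl_map]
  rw [this, PySem.Dict.getD_foldl_modify_append]
  simp [List.filter_map, List.map_map, Function.comp_def]

-- an element of the window lands in one of the two probed cells per axis
theorem pv_cell_cover (a v : Int) (h1 : a ≤ v) (h2 : v ≤ a + 9) :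
    PySem.Int.floordiv v 10 = PySem.Int.floordiv a 10 ∨
    PySem.Int.floordiv v 10 = PySem.Int.floordiv (a + 9) 10 := by
  rw [PySem.Int.floordiv_eq_ediv_of_pos (by omega), PySem.Int.floordiv_eq_ediv_of_pos (by omega),
      PySem.Int.floordiv_eq_ediv_of_pos (by omega)]
  omega

theorem pv_matched0_eq (ys : List (Int × Int)) (j : Int × Int) :
    pvMatched0 (pvGrid ys) j = ys.any (fun i => pvNear j i) := by
  rcases Bool.eq_false_or_eq_true (ys.any (fun i => pvNear j i)) with h | h <;> rw [h]
  case inr =>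
    rw [Bool.eq_false_iff]
    intro hc
    unfold pvMatched0 at hc
    simp only [List.any_eq_true, pv_grid_getD, List.mem_filter] at hc
    obtain ⟨cx, _, cy, _, i, ⟨hi, _⟩, hn⟩ := hc
    rw [pv_nearB_eq_near] at hn
    have : ys.any (fun i => pvNear j i) = true := List.any_eq_true.2 ⟨i, hi, hn⟩
    simp [h] at this
  case inl =>
    obtain ⟨i, hi, hn⟩ := List.any_eq_true.1 h
    unfold pvMatched0
    simp only [List.any_eq_true, pv_grid_getD, List.mem_filter]
    have hb : ((i.1 - 5 ≤ j.1 ∧ j.1 < i.1 + 5) ∧ (i.2 - 5 ≤ j.2 ∧ j.2 < i.2 + 5)) := by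
      simpa [pvNear] using hn
    have hx := pv_cell_cover (j.1 - 4) i.1 (by omega) (by omega)
    have hy := pv_cell_cover (j.2 - 4) i.2 (by omega) (by omega)
    refine ⟨PySem.Int.floordiv i.1 10, ?_, PySem.Int.floordiv i.2 10, ?_, i, ⟨hi, by simp⟩, ?_⟩
    · simp only [List.mem_cons, List.not_mem_nil, or_false, PySem.Int.floordiv_eq_ediv_of_pos (show (0:Int) < 10 by omega)] at hx ⊢
      omega
    · simp only [List.mem_cons, List.not_mem_nil, or_false, PySem.Int.floordiv_eq_ediv_of_pos (show (0:Int) < 10 by omega)] at hy ⊢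
      omega
    · rw [pv_nearB_eq_near]; exact hn

theorem pv_matched1_eq (xs : List (Int × Int)) (i : Int × Int) :
    pvMatched1 (pvGrid xs) i = xs.any (fun j => pvNear j i) := by
  rcases Bool.eq_false_or_eq_true (xs.any (fun j => pvNear j i)) with h | h <;> rw [h]
  case inr =>
    rw [Bool.eq_false_iff]
    intro hc
    unfold pvMatched1 at hc
    simp only [List.any_eq_true, pv_grid_getD, List.mem_filter] at hc
    obtain ⟨cx, _, cy, _, j, ⟨hj, _⟩, hn⟩ := hc
    rw [pv_nearB_eq_near] at hn
    have : xs.any (fun j => pvNear j i) = true := List.any_eq_true.2 ⟨j, hj, hn⟩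
    simp [h] at this
  case inl =>
    obtain ⟨j, hj, hn⟩ := List.any_eq_true.1 h
    unfold pvMatched1
    simp only [List.any_eq_true, pv_grid_getD, List.mem_filter]
    have hb : ((i.1 - 5 ≤ j.1 ∧ j.1 < i.1 + 5) ∧ (i.2 - 5 ≤ j.2 ∧ j.2 < i.2 + 5)) := by
      simpa [pvNear] using hn
    have hx := pv_cell_cover (i.1 - 5) j.1 (by omega) (by omega)
    have hy := pv_cell_cover (i.2 - 5) j.2 (by omega) (by omega)
    refine ⟨PySem.Int.floordiv j.1 10, ?_, PySem.Int.floordiv j.2 10, ?_, j, ⟨hj, by simp⟩, ?_⟩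
    · simp only [List.mem_cons, List.not_mem_nil, or_false, PySem.Int.floordiv_eq_ediv_of_pos (show (0:Int) < 10 by omega)] at hx ⊢
      omega
    · simp only [List.mem_cons, List.not_mem_nil, or_false, PySem.Int.floordiv_eq_ediv_of_pos (show (0:Int) < 10 by omega)] at hy ⊢
      omega
    · rw [pv_nearB_eq_near]; exact hn

-- B in its flat form: filter by "some point of the other list is near"
theorem pv_alt_eq (r : (List (Int × Int)) × (List (Int × Int))) :
    del_noise_point_alt r =
      (r.1.filter (fun j => !(r.2.any (fun i => pvNear j i))),
       r.2.filter (fun i => !(r.1.any (fun j => pvNear j i)))) := by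
  unfold del_noise_point_alt
  dsimp only
  congr 1
  · apply List.filter_congr; intro j _; rw [pv_matched0_eq]
  · apply List.filter_congr; intro i _; rw [pv_matched1_eq]

-- ===== VERDICT (by name: the statement is the Claim_ definition above) =====
theorem del_noise_point_spec : Claim_equal_del_noise_point := by
  intro r _
  unfold Spec_del_noise_point
  rw [pv_alt_eq]
  unfold del_noise_point
  rw [pv_outer]
  simp only [List.nil_append]
  set T2 := r.2.flatMap (fun i => r.1.filter (fun j => pvNear j i)) with hT2
  set T1 := r.2.flatMap (fun i => (r.1.filter (fun j => pvNear j i)).map (fun _ => i)) with hT1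
  rw [pv_remove_double, pv_remove_double]
  have h2empty : T2.filter (fun i => !(decide (i ∈ r.1))) = [] := by
    rw [List.filter_eq_nil_iff]
    intro a ha
    have := (pv_mem_tmp2 r.1 r.2 a).1 (hT2 ▸ ha)
    simp [this.1]
  have h1empty : T1.filter (fun i => !(decide (i ∈ r.2))) = [] := by
    rw [List.filter_eq_nil_iff]
    intro a ha
    have := (pv_mem_tmp r.1 r.2 a).1 (hT1 ▸ ha)
    simp [this.1]
  rw [h2empty, h1empty, List.append_nil, List.append_nil]
  congr 1
  · apply List.filter_congr
    intro j hj
    have : j ∈ T2 ↔ (r.2.any (fun i => pvNear j i)) = true := by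
      rw [hT2, pv_mem_tmp2]; simp [hj]
    by_cases h : j ∈ T2
    · simp [h, this.1 h]
    · have : ¬ (r.2.any (fun i => pvNear j i)) = true := fun hc => h (this.2 hc)
      simp [h, this]
  · apply List.filter_congr
    intro i hi
    have : i ∈ T1 ↔ (r.1.any (fun j => pvNear j i)) = true := by
      rw [hT1, pv_mem_tmp]; simp [hi]
    by_cases h : i ∈ T1
    · simp [h, this.1 h]
    · have : ¬ (r.1.any (fun j => pvNear j i)) = true := fun hc => h (this.2 hc)
      simp [h, this]
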